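-- pv_equiv track=rewrite | github.com/FrankJonasmoelle/Novelty-Detection | tfbidf_threading.py | search_w_count
-- ===== SOURCE A (Python) =====
-- def get_prior_patent_list(patent_mapping, date):
--     """returns list of patent_ids that have been published prior to *date*"""
--     prior_patent_ls = []
--     for key, value in patent_mapping.items():
--         current_date = value["date"]
--         if current_date < date:
--             prior_patent_ls.append(key)
--         else:
--             break # since patent_mapping is sorted by date, we can exit (there are no more earlier patents)
--     return prior_patent_ls
--
-- def search_w_count(patent_mapping, patent, term, term_count_per_patent):
--     prevous_patent_ids_ls = get_prior_patent_list(patent_mapping, patent_mapping[patent]["date"]) #everything before id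
--     # search reversed list
--     prevous_patent_ids_ls.reverse()
--     for patent_id in prevous_patent_ids_ls:
--         # check if term exists in term_count_per_patent for patent_id
--         if term in term_count_per_patent[patent_id]["counts"]:
--             w_count = term_count_per_patent[patent_id]["counts"][term]
--             return w_count
--     # if nothing is returned by now, the term does not exist before patent_id, i.e., count is 0
--     return 0
-- ===== SOURCE B (Python) =====
-- def search_w_count(patent_mapping, patent, term, term_count_per_patent):
--     cutoff = patent_mapping[patent]["date"]
--     w_count = 0
--     for key, value in patent_mapping.items():
--         if value["date"] >= cutoff:
--             break
--         counts = term_count_per_patent[key]["counts"]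
--         if term in counts:
--             w_count = counts[term]
--     return w_count
-- ===== Notes on version B (the rewrite author's own statement) =====
-- stated objective: simpler
-- what changed: Single forward pass with a last-match accumulator replaces A's build-prior-list + reverse + backward first-match early-return; no intermediate list is built.
import Mathlib
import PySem

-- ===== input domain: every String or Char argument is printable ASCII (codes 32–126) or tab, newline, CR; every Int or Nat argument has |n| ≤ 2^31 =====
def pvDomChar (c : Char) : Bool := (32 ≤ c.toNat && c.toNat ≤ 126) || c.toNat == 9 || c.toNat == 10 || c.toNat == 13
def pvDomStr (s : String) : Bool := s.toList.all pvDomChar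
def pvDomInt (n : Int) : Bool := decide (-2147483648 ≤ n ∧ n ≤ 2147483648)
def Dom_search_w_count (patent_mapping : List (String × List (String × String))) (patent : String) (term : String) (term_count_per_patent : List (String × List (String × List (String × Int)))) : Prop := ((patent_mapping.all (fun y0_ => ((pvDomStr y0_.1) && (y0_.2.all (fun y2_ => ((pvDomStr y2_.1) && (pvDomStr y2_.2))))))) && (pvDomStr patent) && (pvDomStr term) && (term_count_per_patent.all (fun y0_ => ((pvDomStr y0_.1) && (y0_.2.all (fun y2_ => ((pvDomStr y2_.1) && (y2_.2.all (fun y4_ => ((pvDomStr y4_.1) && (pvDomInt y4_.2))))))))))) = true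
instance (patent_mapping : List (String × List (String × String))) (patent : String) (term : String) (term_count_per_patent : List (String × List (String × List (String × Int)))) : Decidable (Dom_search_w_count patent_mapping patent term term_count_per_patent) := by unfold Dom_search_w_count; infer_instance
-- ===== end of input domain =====

-- B replaces A's build-prior-list + reverse + backward first-match by one forward pass with a
-- last-match accumulator (objective: simpler; return value only, A mutates no argument observably).

-- dict lookup on an association list: first pair with matching key (Python dict semantics)
def dget {α : Type} : List (String × α) → String → Option α
  | [], _ => none
  | (k, v) :: rest, key => if k == key then some v else dget rest key

-- ===== PORT A =====
-- helper get_prior_patent_list: loop appending keys while value["date"] < date, break otherwise;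
-- none = KeyError reading value["date"] (excluded by Pre_)
def get_prior_patent_list : List (String × List (String × String)) → String → Option (List String)
  | [], _ => some []
  | (key, value) :: rest, date =>
    match dget value "date" with
    | none => none
    | some current_date =>
      if current_date < date then (get_prior_patent_list rest date).map (key :: ·)
      else some []

-- the for-loop over the reversed prior list; 0-returning `none` branches are KeyErrors (excluded by Pre_)
def searchLoopA (term : String) (term_count_per_patent : List (String × List (String × List (String × Int)))) : List String → Int
  | [] => 0
  | patent_id :: rest =>
    match dget term_count_per_patent patent_id with
    | none => 0
    | some rec_ =>
      match dget rec_ "counts" with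
      | none => 0
      | some counts =>
        match dget counts term with
        | some w_count => w_count
        | none => searchLoopA term term_count_per_patent rest

def search_w_count (patent_mapping : List (String × List (String × String))) (patent : String) (term : String) (term_count_per_patent : List (String × List (String × List (String × Int)))) : Int :=
  match dget patent_mapping patent with
  | none => 0  -- KeyError, excluded by Pre_
  | some pd =>
    match dget pd "date" with
    | none => 0  -- KeyError, excluded by Pre_
    | some date =>
      match get_prior_patent_list patent_mapping date with
      | none => 0  -- KeyError, excluded by Pre_
      | some prevous_patent_ids_ls => searchLoopA term term_count_per_patent prevous_patent_ids_ls.reverse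

-- ===== PORT B =====
-- forward pass: break at the first date ≥ cutoff, otherwise overwrite w_count when term is present
def altLoop (term : String) (term_count_per_patent : List (String × List (String × List (String × Int)))) : List (String × List (String × String)) → String → Int → Int
  | [], _, w_count => w_count
  | (key, value) :: rest, cutoff, w_count =>
    match dget value "date" with
    | none => w_count  -- KeyError, excluded by Pre_
    | some d =>
      if d < cutoff then
        match dget term_count_per_patent key with
        | none => w_count  -- KeyError, excluded by Pre_
        | some rec_ =>
          match dget rec_ "counts" with
          | none => w_count  -- KeyError, excluded by Pre_
          | some counts =>
            match dget counts term with
            | some c => altLoop term term_count_per_patent rest cutoff c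
            | none => altLoop term term_count_per_patent rest cutoff w_count
      else w_count  -- break

def search_w_count_alt (patent_mapping : List (String × List (String × String))) (patent : String) (term : String) (term_count_per_patent : List (String × List (String × List (String × Int)))) : Int :=
  match (dget patent_mapping patent).bind (fun pd => dget pd "date") with
  | none => 0  -- KeyError, excluded by Pre_
  | some cutoff => altLoop term term_count_per_patent patent_mapping cutoff 0

-- ===== PRECONDITION & SPEC =====
-- association-list lookup (first matching key), used only to state the precondition
def pvLookup {α : Type} (key : String) (l : List (String × α)) : Option α :=
  (l.find? (fun q => q.1 == key)).map (fun q => q.2)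

-- is this patent-mapping entry dated strictly before the cutoff date?
def pvPrior (d0 : String) (p : String × List (String × String)) : Bool :=
  match pvLookup "date" p.2 with
  | some d => PySem.Chars.strLt d.toList d0.toList
  | none => false

-- Pre_ excludes the inputs where the Python raises KeyError: the patent (or its "date") missing,
-- a missing "date" on the record at which the scan stops, or a prior patent without a "counts"
-- table. It is slightly narrower than A's raise-free set: it requires "counts" for ALL prior
-- patents, while A's backward scan stops at its first match and may return with a malformed
-- earlier prior record untouched, an accident of scan order (see the cite in the claim).
def Pre_search_w_count (patent_mapping : List (String × List (String × String))) (patent : String) (term : String) (term_count_per_patent : List (String × List (String × List (String × Int)))) : Prop :=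
  ((pvLookup patent patent_mapping).bind (fun pd => pvLookup "date" pd)).isSome = true ∧
  (∀ p ∈ (patent_mapping.dropWhile (pvPrior (((pvLookup patent patent_mapping).bind (fun pd => pvLookup "date" pd)).getD ""))).take 1,
     (pvLookup "date" p.2).isSome = true) ∧
  (∀ p ∈ patent_mapping.takeWhile (pvPrior (((pvLookup patent patent_mapping).bind (fun pd => pvLookup "date" pd)).getD "")),
     ∃ r, pvLookup p.1 term_count_per_patent = some r ∧ (pvLookup "counts" r).isSome = true)
instance (patent_mapping : List (String × List (String × String))) (patent : String) (term : String) (term_count_per_patent : List (String × List (String × List (String × Int)))) : Decidable (Pre_search_w_count patent_mapping patent term term_count_per_patent) := by unfold Pre_search_w_count; infer_instance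

def pvWitness_search_w_count : (List (String × List (String × String))) × String × String × (List (String × List (String × List (String × Int)))) :=
  ([("a", [("date", "2001")]), ("b", [("date", "2002")]), ("c", [("date", "2003")])], "c", "t",
   [("a", [("counts", [("t", 4)])]), ("b", [("counts", [("t", 7)])]), ("c", [("counts", [])])])

def Spec_search_w_count (patent_mapping : List (String × List (String × String))) (patent : String) (term : String) (term_count_per_patent : List (String × List (String × List (String × Int)))) (out : Int) : Prop := out = search_w_count_alt patent_mapping patent term term_count_per_patent
instance (patent_mapping : List (String × List (String × String))) (patent : String) (term : String) (term_count_per_patent : List (String × List (String × List (String × Int)))) (out : Int) : Decidable (Spec_search_w_count patent_mapping patent term term_count_per_patent out) := by unfold Spec_search_w_count; infer_instance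

-- ===== CLAIM (what is proved, stated in full; the proofs are below) =====
def Claim_equal_search_w_count : Prop := ∀ (patent_mapping : List (String × List (String × String))) (patent : String) (term : String) (term_count_per_patent : List (String × List (String × List (String × Int)))), Dom_search_w_count patent_mapping patent term term_count_per_patent → Pre_search_w_count patent_mapping patent term term_count_per_patent → Spec_search_w_count patent_mapping patent term term_count_per_patent (search_w_count patent_mapping patent term term_count_per_patent)

-- ===== LEMMAS AND PROOFS =====

-- dget is pvLookup with the arguments swapped
theorem lookup_eq_dget {α : Type} (l : List (String × α)) (k : String) :
    pvLookup k l = dget l k := by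
  induction l with
  | nil => rfl
  | cons q rest ih =>
    obtain ⟨k', v'⟩ := q
    by_cases hk : k' == k
    · simp [pvLookup, List.find?_cons_of_pos, hk, dget]
    · rw [pvLookup, List.find?_cons_of_neg (by simpa using hk), dget, if_neg hk, ← ih]
      rfl

-- the count of `term` in patent `k`, as an Option (some = present)
def lookupC (term : String) (tcpp : List (String × List (String × List (String × Int)))) (k : String) : Option Int :=
  (dget tcpp k).bind (fun r => (dget r "counts").bind (fun counts => dget counts term))

-- keys of the prior prefix (entries with date < cutoff, stopping at the first ≥ or undated one)
def priorKeys : List (String × List (String × String)) → String → List String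
  | [], _ => []
  | (k, v) :: rest, cutoff =>
    match dget v "date" with
    | none => []
    | some d => if d < cutoff then k :: priorKeys rest cutoff else []

theorem strLt_iff (s t : String) : PySem.Chars.strLt s.toList t.toList = true ↔ s < t := by
  unfold PySem.Chars.strLt
  rw [decide_eq_true_iff]
  exact Iff.symm String.lt_iff_toList_lt

theorem pvPrior_none {d0 : String} {k : String} {v : List (String × String)}
    (h : dget v "date" = none) : pvPrior d0 (k, v) = false := by
  simp [pvPrior, lookup_eq_dget, h]

theorem pvPrior_some {d0 : String} {k : String} {v : List (String × String)} {d : String}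
    (h : dget v "date" = some d) : pvPrior d0 (k, v) = PySem.Chars.strLt d.toList d0.toList := by
  simp [pvPrior, lookup_eq_dget, h]

theorem gppl_eq_priorKeys (l : List (String × List (String × String))) (cutoff : String)
    (h : ∀ p ∈ (l.dropWhile (pvPrior cutoff)).take 1, (pvLookup "date" p.2).isSome = true) :
    get_prior_patent_list l cutoff = some (priorKeys l cutoff) := by
  induction l with
  | nil => rfl
  | cons p rest ih =>
    obtain ⟨k, v⟩ := p
    cases hv : dget v "date" with
    | none =>
      exfalso
      have hp : pvPrior cutoff (k, v) = false := pvPrior_none hv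
      have := h (k, v) (by simp [hp])
      rw [lookup_eq_dget] at this
      simp [hv] at this
    | some d =>
      simp only [get_prior_patent_list, priorKeys, hv]
      by_cases hlt : d < cutoff
      · have hp : pvPrior cutoff (k, v) = true := by rw [pvPrior_some hv]; exact (strLt_iff _ _).mpr hlt
        rw [ih (by simpa [hp] using h)]
        simp [hlt]
      · simp [hlt]

theorem priorKeys_subset (l : List (String × List (String × String))) (cutoff : String) :
    ∀ k ∈ priorKeys l cutoff, ∃ v, (k, v) ∈ l.takeWhile (pvPrior cutoff) := by
  induction l with
  | nil => intro k hk; simp [priorKeys] at hk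
  | cons p rest ih =>
    obtain ⟨k', v'⟩ := p
    intro k hk
    simp only [priorKeys] at hk
    cases hv : dget v' "date" with
    | none => rw [hv] at hk; simp at hk
    | some d =>
      rw [hv] at hk
      have hk2 : k ∈ (if d < cutoff then k' :: priorKeys rest cutoff else []) := hk
      by_cases hlt : d < cutoff
      · have hp : pvPrior cutoff (k', v') = true := by rw [pvPrior_some hv]; exact (strLt_iff _ _).mpr hlt
        rw [if_pos hlt, List.mem_cons] at hk2
        rcases hk2 with hk2 | hk2
        · exact ⟨v', by simp [hp, hk2]⟩
        · obtain ⟨v, hv⟩ := ih k hk2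
          exact ⟨v, by simp [hp, hv]⟩
      · rw [if_neg hlt] at hk2; simp at hk2

theorem searchLoopA_eq_findSome (term : String)
    (tcpp : List (String × List (String × List (String × Int)))) (ls : List String)
    (h : ∀ k ∈ ls, ∃ r, dget tcpp k = some r ∧ (dget r "counts").isSome = true) :
    searchLoopA term tcpp ls = (ls.findSome? (lookupC term tcpp)).getD 0 := by
  induction ls with
  | nil => rfl
  | cons k rest ih =>
    obtain ⟨r, hr, hc⟩ := h k (by simp)
    obtain ⟨counts, hcounts⟩ := Option.isSome_iff_exists.mp hc
    simp only [searchLoopA, hr, hcounts, List.findSome?_cons, lookupC, Option.bind_some]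
    cases hdg : dget counts term with
    | some c => simp
    | none => simp; exact ih (fun k' hk' => h k' (by simp [hk']))

theorem altLoop_eq (term : String) (tcpp : List (String × List (String × List (String × Int))))
    (l : List (String × List (String × String))) (cutoff : String) (acc : Int)
    (h : ∀ p ∈ l.takeWhile (pvPrior cutoff),
      ∃ r, dget tcpp p.1 = some r ∧ (dget r "counts").isSome = true) :
    altLoop term tcpp l cutoff acc =
      ((priorKeys l cutoff).reverse.findSome? (lookupC term tcpp)).getD acc := by
  induction l generalizing acc with
  | nil => rfl
  | cons p rest ih =>
    obtain ⟨k, v⟩ := p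
    cases hd : dget v "date" with
    | none => simp only [altLoop, priorKeys, hd]; rfl
    | some d =>
      simp only [altLoop, priorKeys, hd]
      split_ifs with hlt
      · have hp : pvPrior cutoff (k, v) = true := by rw [pvPrior_some hd]; exact (strLt_iff _ _).mpr hlt
        obtain ⟨r, hr, hc⟩ := h (k, v) (by simp [hp])
        obtain ⟨counts, hcounts⟩ := Option.isSome_iff_exists.mp hc
        have hr' : dget tcpp k = some r := hr
        have hrest : ∀ p ∈ rest.takeWhile (pvPrior cutoff),
            ∃ r, dget tcpp p.1 = some r ∧ (dget r "counts").isSome = true :=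
          fun q hq => h q (by simp [hp, hq])
        have hkC : lookupC term tcpp k = dget counts term := by
          simp [lookupC, hr', hcounts]
        simp only [hr', hcounts, List.reverse_cons, List.findSome?_append]
        cases hdg : dget counts term with
        | some c =>
          cases hfs : (priorKeys rest cutoff).reverse.findSome? (lookupC term tcpp) <;>
            simp [ih c hrest, hfs, hkC, hdg]
        | none =>
          cases hfs : (priorKeys rest cutoff).reverse.findSome? (lookupC term tcpp) <;>
            simp [ih acc hrest, hfs, hkC, hdg]
      · simp

-- ===== VERDICT (by name: the statement is the Claim_ definition above) =====
theorem search_w_count_spec : Claim_equal_search_w_count := by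
  intro pm patent term tcpp _ hpre
  obtain ⟨h1, h2, h3⟩ := hpre
  obtain ⟨cutoff, hcut0⟩ := Option.isSome_iff_exists.mp h1
  obtain ⟨pd, hpd0, hcut1⟩ := Option.bind_eq_some_iff.mp hcut0
  have hpd : dget pm patent = some pd := by rw [← lookup_eq_dget, hpd0]
  have hcut : dget pd "date" = some cutoff := by rw [← lookup_eq_dget, hcut1]
  have hgetd : ((pvLookup patent pm).bind (fun pd => pvLookup "date" pd)).getD "" = cutoff := by
    rw [hcut0]; rfl
  rw [hgetd] at h2 h3
  have h3' : ∀ p ∈ pm.takeWhile (pvPrior cutoff),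
      ∃ r, dget tcpp p.1 = some r ∧ (dget r "counts").isSome = true := by
    intro p hp
    obtain ⟨r, hr, hc⟩ := h3 p hp
    exact ⟨r, by rw [← lookup_eq_dget, hr], by rw [← lookup_eq_dget]; exact hc⟩
  unfold Spec_search_w_count search_w_count search_w_count_alt
  simp only [hpd, hcut, Option.bind_some, gppl_eq_priorKeys pm cutoff h2]
  rw [altLoop_eq term tcpp pm cutoff 0 h3',
      searchLoopA_eq_findSome term tcpp (priorKeys pm cutoff).reverse ?_]
  intro k hk
  rw [List.mem_reverse] at hk
  obtain ⟨v, hv⟩ := priorKeys_subset pm cutoff k hk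
  exact h3' (k, v) hv
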